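-- pv_equiv track=rewrite | github.com/smridhiwho/ai-service | src/smart_suggestions.py | _analyze_input_context
-- ===== SOURCE A (Python) =====
-- def _analyze_input_context(user_input, chatbot_type):
--     """Analyze user input to understand context and intent"""
--     if not user_input:
--         return "general"
--
--     input_lower = user_input.lower()
--
--     if chatbot_type == "patient":
--         if any(word in input_lower for word in ['revenue', 'money', 'amount', 'payment']):
--             return "financial"
--         elif any(word in input_lower for word in ['doctor', 'physician']):
--             return "doctor_focused"
--         elif any(word in input_lower for word in ['patient', 'count', 'number']):
--             return "patient_analytics"
--         elif any(word in input_lower for word in ['city', 'location', 'place']):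
--             return "geographic"
--         elif any(word in input_lower for word in ['2018', '2019', '2020', '2021', '2022', '2023', '2024', '2025']):
--             return "time_based"
--
--     elif chatbot_type == "inventory":
--         if any(word in input_lower for word in ['stock', 'inventory', 'available']):
--             return "stock_levels"
--         elif any(word in input_lower for word in ['purchase', 'buy', 'procurement']):
--             return "purchasing"
--         elif any(word in input_lower for word in ['supplier', 'vendor', 'party']):
--             return "supplier_analysis"
--         elif any(word in input_lower for word in ['order', 'requisition']):
--             return "ordering"
--
--     return "general"
-- ===== SOURCE B (Python) =====
-- # Argmin re-implementation: a flat keyword table maps each keyword to a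
-- # (priority, category) pair; one pass over ALL keywords tracks the matching
-- # pair of minimum priority (no ordered group short-circuit), then returns
-- # its category.  Priorities encode A's branch order, so the minimum-priority
-- # match is exactly the first group A would have fired.
-- _KEYWORDS = {
--     "patient": {
--         'revenue': (0, "financial"), 'money': (0, "financial"),
--         'amount': (0, "financial"), 'payment': (0, "financial"),
--         'doctor': (1, "doctor_focused"), 'physician': (1, "doctor_focused"),
--         'patient': (2, "patient_analytics"), 'count': (2, "patient_analytics"),
--         'number': (2, "patient_analytics"),
--         'city': (3, "geographic"), 'location': (3, "geographic"),
--         'place': (3, "geographic"),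
--         '2018': (4, "time_based"), '2019': (4, "time_based"),
--         '2020': (4, "time_based"), '2021': (4, "time_based"),
--         '2022': (4, "time_based"), '2023': (4, "time_based"),
--         '2024': (4, "time_based"), '2025': (4, "time_based"),
--     },
--     "inventory": {
--         'stock': (0, "stock_levels"), 'inventory': (0, "stock_levels"),
--         'available': (0, "stock_levels"),
--         'purchase': (1, "purchasing"), 'buy': (1, "purchasing"),
--         'procurement': (1, "purchasing"),
--         'supplier': (2, "supplier_analysis"), 'vendor': (2, "supplier_analysis"),
--         'party': (2, "supplier_analysis"),
--         'order': (3, "ordering"), 'requisition': (3, "ordering"),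
--     },
-- }
--
-- def _analyze_input_context(user_input, chatbot_type):
--     if not user_input:
--         return "general"
--     input_lower = user_input.lower()
--     best = None
--     for kw, pc in _KEYWORDS.get(chatbot_type, {}).items():
--         if kw in input_lower and (best is None or pc[0] < best[0]):
--             best = pc
--     return best[1] if best is not None else "general"
-- ===== Notes on version B (the rewrite author's own statement) =====
-- stated objective: alternative
-- what changed: Replaced the ordered if/elif group scan by an argmin: a flat keyword->(priority,category) table is scanned in full, tracking the matching entry of minimum priority; priorities encode A's branch order so the minimum-priority match equals A's first firing group.
import Mathlib
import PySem

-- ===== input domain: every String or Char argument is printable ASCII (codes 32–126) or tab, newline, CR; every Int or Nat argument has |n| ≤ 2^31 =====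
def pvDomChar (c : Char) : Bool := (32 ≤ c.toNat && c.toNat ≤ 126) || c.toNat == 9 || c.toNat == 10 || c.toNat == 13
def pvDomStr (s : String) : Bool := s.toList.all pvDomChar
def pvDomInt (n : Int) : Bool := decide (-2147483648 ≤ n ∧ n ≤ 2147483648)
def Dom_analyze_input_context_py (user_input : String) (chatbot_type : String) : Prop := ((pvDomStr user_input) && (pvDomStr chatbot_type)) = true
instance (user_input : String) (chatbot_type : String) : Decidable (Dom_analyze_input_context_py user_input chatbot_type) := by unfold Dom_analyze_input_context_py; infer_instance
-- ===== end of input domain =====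

-- B replaces A's ordered if/elif group scan by an argmin over a flat keyword→(priority, category)
-- table: one full pass tracks the matching entry of minimum priority; objective: alternative, same cost.

-- ===== PORT A =====
def analyze_input_context_py (user_input : String) (chatbot_type : String) : String :=
  if user_input == "" then "general"
  else
    let input_lower := PySem.Str.lower user_input
    if chatbot_type == "patient" then
      if ["revenue", "money", "amount", "payment"].any (fun w => PySem.Str.isIn w input_lower) then "financial"
      else if ["doctor", "physician"].any (fun w => PySem.Str.isIn w input_lower) then "doctor_focused"
      else if ["patient", "count", "number"].any (fun w => PySem.Str.isIn w input_lower) then "patient_analytics"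
      else if ["city", "location", "place"].any (fun w => PySem.Str.isIn w input_lower) then "geographic"
      else if ["2018", "2019", "2020", "2021", "2022", "2023", "2024", "2025"].any (fun w => PySem.Str.isIn w input_lower) then "time_based"
      else "general"
    else if chatbot_type == "inventory" then
      if ["stock", "inventory", "available"].any (fun w => PySem.Str.isIn w input_lower) then "stock_levels"
      else if ["purchase", "buy", "procurement"].any (fun w => PySem.Str.isIn w input_lower) then "purchasing"
      else if ["supplier", "vendor", "party"].any (fun w => PySem.Str.isIn w input_lower) then "supplier_analysis"
      else if ["order", "requisition"].any (fun w => PySem.Str.isIn w input_lower) then "ordering"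
      else "general"
    else "general"

-- ===== PORT B =====
-- Source B's module-level _KEYWORDS: chatbot_type → (keyword → (priority, category))
def pvKeywords : PySem.Dict String (PySem.Dict String (Int × String)) :=
  PySem.Dict.ofList
    [ ("patient", PySem.Dict.ofList
        [ ("revenue", (0, "financial")), ("money", (0, "financial")),
          ("amount", (0, "financial")), ("payment", (0, "financial")),
          ("doctor", (1, "doctor_focused")), ("physician", (1, "doctor_focused")),
          ("patient", (2, "patient_analytics")), ("count", (2, "patient_analytics")),
          ("number", (2, "patient_analytics")),
          ("city", (3, "geographic")), ("location", (3, "geographic")),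
          ("place", (3, "geographic")),
          ("2018", (4, "time_based")), ("2019", (4, "time_based")),
          ("2020", (4, "time_based")), ("2021", (4, "time_based")),
          ("2022", (4, "time_based")), ("2023", (4, "time_based")),
          ("2024", (4, "time_based")), ("2025", (4, "time_based")) ]),
      ("inventory", PySem.Dict.ofList
        [ ("stock", (0, "stock_levels")), ("inventory", (0, "stock_levels")),
          ("available", (0, "stock_levels")),
          ("purchase", (1, "purchasing")), ("buy", (1, "purchasing")),
          ("procurement", (1, "purchasing")),
          ("supplier", (2, "supplier_analysis")), ("vendor", (2, "supplier_analysis")),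
          ("party", (2, "supplier_analysis")),
          ("order", (3, "ordering")), ("requisition", (3, "ordering")) ]) ]

-- Source B's loop body: keep the matching (priority, category) of minimum priority seen so far
def pvStep (input_lower : String) (best : Option (Int × String)) (kp : String × Int × String) : Option (Int × String) :=
  if PySem.Str.isIn kp.1 input_lower && (match best with | none => true | some b => decide (kp.2.1 < b.1)) then
    some kp.2
  else best

def analyze_input_context_py_alt (user_input : String) (chatbot_type : String) : String :=
  if user_input == "" then "general"
  else
    let input_lower := PySem.Str.lower user_input
    let best := ((PySem.Dict.getD pvKeywords chatbot_type PySem.Dict.empty).items).foldl (pvStep input_lower) none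
    match best with
    | some b => b.2
    | none => "general"

-- ===== PRECONDITION & SPEC =====
def Spec_analyze_input_context_py (user_input : String) (chatbot_type : String) (out : String) : Prop := out = analyze_input_context_py_alt user_input chatbot_type
instance (user_input : String) (chatbot_type : String) (out : String) : Decidable (Spec_analyze_input_context_py user_input chatbot_type out) := by unfold Spec_analyze_input_context_py; infer_instance

-- ===== CLAIM =====
def Claim_equal_analyze_input_context_py : Prop := ∀ (user_input : String) (chatbot_type : String), Dom_analyze_input_context_py user_input chatbot_type → Spec_analyze_input_context_py user_input chatbot_type (analyze_input_context_py user_input chatbot_type)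

-- ===== LEMMAS AND PROOFS =====

-- proof-side view of the keyword table: groups of keywords sharing one (priority, category)
def pvPatientGroups : List (List String × Int × String) :=
  [ (["revenue", "money", "amount", "payment"], 0, "financial"),
    (["doctor", "physician"], 1, "doctor_focused"),
    (["patient", "count", "number"], 2, "patient_analytics"),
    (["city", "location", "place"], 3, "geographic"),
    (["2018", "2019", "2020", "2021", "2022", "2023", "2024", "2025"], 4, "time_based") ]

def pvInventoryGroups : List (List String × Int × String) :=
  [ (["stock", "inventory", "available"], 0, "stock_levels"),
    (["purchase", "buy", "procurement"], 1, "purchasing"),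
    (["supplier", "vendor", "party"], 2, "supplier_analysis"),
    (["order", "requisition"], 3, "ordering") ]

-- first group with a matching keyword (= A's elif chain, abstractly)
def pvFirst? (input_lower : String) : List (List String × Int × String) → Option (Int × String)
  | [] => none
  | g :: rest =>
      if g.1.any (fun w => PySem.Str.isIn w input_lower) then some g.2
      else pvFirst? input_lower rest

theorem pvStep_stay (low : String) (p : Int) (c : String)
    (items : List (String × Int × String)) (h : ∀ x ∈ items, p ≤ x.2.1) :
    items.foldl (pvStep low) (some (p, c)) = some (p, c) := by
  induction items with
  | nil => rfl
  | cons x xs ih =>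
    have hx := h x (by simp)
    simp only [List.foldl_cons, pvStep]
    rw [if_neg (by simp only [Bool.and_eq_true, decide_eq_true_eq]; rintro ⟨-, hlt⟩; omega)]
    exact ih (fun y hy => h y (by simp [hy]))

theorem pvGroup_match (low : String) (kws : List String) (p : Int) (c : String)
    (h : kws.any (fun w => PySem.Str.isIn w low) = true) :
    (kws.map (fun w => (w, (p, c)))).foldl (pvStep low) none = some (p, c) := by
  induction kws with
  | nil => simp at h
  | cons w ws ih =>
    simp only [List.map_cons, List.foldl_cons, pvStep]
    by_cases hw : PySem.Chars.isIn w.toList low.toList = true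
    · rw [if_pos (by simp [hw])]
      exact pvStep_stay low p c _ (fun x hx => by
        obtain ⟨w', -, rfl⟩ := List.mem_map.mp hx; simp)
    · rw [if_neg (by simp [hw])]
      apply ih
      rcases (by simpa [List.any_cons] using h : PySem.Chars.isIn w.toList low.toList = true ∨ ∃ x ∈ ws, PySem.Chars.isIn x.toList low.toList = true) with h' | h'
      · exact absurd h' hw
      · simpa using h'

theorem pvGroup_skip (low : String) (kws : List String) (p : Int) (c : String)
    (b : Option (Int × String)) (h : kws.any (fun w => PySem.Str.isIn w low) = false) :
    (kws.map (fun w => (w, (p, c)))).foldl (pvStep low) b = b := by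
  induction kws with
  | nil => rfl
  | cons w ws ih =>
    simp only [List.any_cons, Bool.or_eq_false_iff] at h
    have hw : PySem.Chars.isIn w.toList low.toList = false := by simpa using h.1
    simp only [List.map_cons, List.foldl_cons, pvStep]
    rw [if_neg (by simp [hw])]
    exact ih h.2

-- the argmin fold over the flattened table equals first-match over the groups,
-- provided group priorities are nondecreasing along the list
theorem pvFold_eq_first (low : String) (gs : List (List String × Int × String))
    (h : gs.Pairwise (fun a b => a.2.1 ≤ b.2.1)) :
    (gs.flatMap (fun g => g.1.map (fun w => (w, g.2)))).foldl (pvStep low) none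
      = pvFirst? low gs := by
  induction gs with
  | nil => rfl
  | cons g rest ih =>
    obtain ⟨kws, p, c⟩ := g
    obtain ⟨hhead, htail⟩ := List.pairwise_cons.mp h
    simp only [List.flatMap_cons, List.foldl_append]
    by_cases hg : kws.any (fun w => PySem.Str.isIn w low) = true
    · rw [pvGroup_match low kws p c hg]
      rw [pvStep_stay low p c _ (fun x hx => by
        obtain ⟨g', hg', hx'⟩ := List.mem_flatMap.mp hx
        obtain ⟨w', -, rfl⟩ := List.mem_map.mp hx'
        exact hhead g' hg')]
      rw [pvFirst?, if_pos hg]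
    · rw [pvGroup_skip low kws p c _ (by simpa using hg), ih htail, pvFirst?,
        if_neg hg]

theorem pvItems_patient :
    (PySem.Dict.getD pvKeywords "patient" PySem.Dict.empty).items
      = pvPatientGroups.flatMap (fun g => g.1.map (fun w => (w, g.2))) := by decide

theorem pvItems_inventory :
    (PySem.Dict.getD pvKeywords "inventory" PySem.Dict.empty).items
      = pvInventoryGroups.flatMap (fun g => g.1.map (fun w => (w, g.2))) := by decide

theorem pvKeys : pvKeywords.keys = ["patient", "inventory"] := by decide

-- ===== VERDICT =====
theorem analyze_input_context_py_spec : Claim_equal_analyze_input_context_py := by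
  intro u t _
  unfold Spec_analyze_input_context_py analyze_input_context_py analyze_input_context_py_alt
  by_cases h0 : u == ""
  · simp [h0]
  · by_cases hp : t = "patient"
    · subst hp
      simp only [h0, if_false, beq_self_eq_true, if_true, Bool.false_eq_true]
      rw [pvItems_patient, pvFold_eq_first _ _ (by decide)]
      simp only [pvFirst?, pvPatientGroups]
      split_ifs <;> rfl
    · by_cases hi : t = "inventory"
      · subst hi
        simp only [h0, if_false, beq_self_eq_true, if_true, Bool.false_eq_true,
          show (("inventory" : String) == "patient") = false by decide]
        rw [pvItems_inventory, pvFold_eq_first _ _ (by decide)]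
        simp only [pvFirst?, pvInventoryGroups]
        split_ifs <;> rfl
      · have hcont : pvKeywords.contains t = false := by
          rw [PySem.Dict.contains_eq_decide_mem_keys, pvKeys]
          simp [hp, hi]
        simp [h0, hp, hi, PySem.Dict.getD_of_not_contains, hcont]
        rfl
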